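-- pv_equiv track=rewrite | github.com/EastFlovv/AlgorithmHub | 프로그래머스/unrated/172928. 공원 산책/공원 산책.py | move_dog
-- ===== SOURCE A (Python) =====
-- def move_dog(board, cur_pos, direction, distance):
--     dis = int(distance)
-- #     현재 위치
--     ci, cj = cur_pos
-- #     이동 방향
--     mi = 0
--     mj = 0
--     if direction == 'N':
--         mi = -1
--     elif direction == 'S':
--         mi = 1
--     elif direction == 'W':
--         mj = -1
--     else:
--         mj = 1
--
--     for i in range(dis):
-- #         이동
--         ci += mi
--         cj += mj
--
-- #         만약 실패조건을 만난다면 원래 위치를 전송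
--         if 0 > ci or 0 > cj or len(board) == ci or len(board[0]) == cj:
--             return cur_pos
--         elif board[ci][cj] == 'X' :
--             return cur_pos
-- #     실패하지 않는다면 변경된 위치를 전송
--     return (ci, cj)
-- ===== SOURCE B (Python) =====
-- DIRS = {'N': (-1, 0), 'S': (1, 0), 'W': (0, -1)}
--
-- def move_dog(board, cur_pos, direction, distance):
--     dis = max(int(distance), 0)
--     mi, mj = DIRS.get(direction, (0, 1))
--     ci, cj = cur_pos[0] + mi * dis, cur_pos[1] + mj * dis
--     if dis and not (0 <= ci < len(board) and 0 <= cj < len(board[0])):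
--         return cur_pos
--     if any(board[cur_pos[0] + mi * k][cur_pos[1] + mj * k] == 'X'
--            for k in range(1, dis + 1)):
--         return cur_pos
--     return (ci, cj)
-- ===== Notes on version B (the rewrite author's own statement) =====
-- stated objective: alternative
-- what changed: B replaces A's per-step walk (bounds + wall checked at every step with early return) by a closed-form endpoint with a single bounds check, followed by one scan of the intermediate cells for walls only.
-- outside the precondition, e.g. on move_dog([['.', '.'], ['.']], (0, 0), 'E', '1'): A returns (0, 1), B returns (0, 1); on move_dog([['.'], ['.'], ['.']], (-5, 0), 'S', '6'): A returns (-5, 0), B raises IndexError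
import Mathlib
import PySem

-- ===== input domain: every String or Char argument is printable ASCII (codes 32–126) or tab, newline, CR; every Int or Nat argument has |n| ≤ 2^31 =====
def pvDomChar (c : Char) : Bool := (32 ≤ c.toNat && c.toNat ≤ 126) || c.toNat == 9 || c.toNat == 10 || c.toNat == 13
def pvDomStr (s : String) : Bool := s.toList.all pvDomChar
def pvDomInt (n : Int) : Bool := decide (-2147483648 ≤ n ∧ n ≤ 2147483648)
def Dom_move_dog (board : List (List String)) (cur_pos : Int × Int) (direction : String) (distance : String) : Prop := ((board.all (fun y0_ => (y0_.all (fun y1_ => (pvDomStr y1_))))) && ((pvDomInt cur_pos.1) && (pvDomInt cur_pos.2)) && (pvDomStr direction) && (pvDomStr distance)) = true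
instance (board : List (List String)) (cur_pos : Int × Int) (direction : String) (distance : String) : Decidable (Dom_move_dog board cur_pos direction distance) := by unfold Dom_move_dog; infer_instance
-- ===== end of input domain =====

-- B replaces A's per-step walk (bounds and wall checked at every step) by a closed-form endpoint
-- with one bounds check plus one wall scan of the intermediate cells (alternative decomposition,
-- same O(distance) cost). Equivalence is about RETURN VALUES: Python A returns the cur_pos object
-- itself on failure and a fresh tuple on success; both are the same pair of ints here.

-- board[i][j] as both Pythons write it (total form; Pre_ keeps us where Python does not raise)
def pvCell (board : List (List String)) (i j : Int) : String :=
  (PySem.List.pyGet? ((PySem.List.pyGet? board i).getD []) j).getD ""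

-- ===== PORT A =====
def pvWalkA (board : List (List String)) (cur : Int × Int) (mi mj : Int) :
    Int → Int → Nat → Int × Int
  | ci, cj, 0 => (ci, cj)
  | ci, cj, n + 1 =>
    if 0 > ci + mi ∨ 0 > cj + mj ∨ (board.length : Int) = ci + mi ∨
        ((board.headD []).length : Int) = cj + mj then
      cur
    else if pvCell board (ci + mi) (cj + mj) = "X" then cur
    else pvWalkA board cur mi mj (ci + mi) (cj + mj) n

def move_dog (board : List (List String)) (cur_pos : Int × Int) (direction : String) (distance : String) : Int × Int :=
  let dis : Int := (PySem.Int.ofStr? distance).getD 0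
  let m : Int × Int :=
    if direction = "N" then (-1, 0)
    else if direction = "S" then (1, 0)
    else if direction = "W" then (0, -1)
    else (0, 1)
  pvWalkA board cur_pos m.1 m.2 cur_pos.1 cur_pos.2 dis.toNat

-- ===== PORT B =====
def move_dog_alt (board : List (List String)) (cur_pos : Int × Int) (direction : String) (distance : String) : Int × Int :=
  let dis : Int := max ((PySem.Int.ofStr? distance).getD 0) 0
  let m : Int × Int :=
    (PySem.Dict.ofList [("N", ((-1 : Int), (0 : Int))), ("S", (1, 0)), ("W", (0, -1))]).getD
      direction (0, 1)
  if dis ≠ 0 ∧ ¬(0 ≤ cur_pos.1 + m.1 * dis ∧ cur_pos.1 + m.1 * dis < (board.length : Int) ∧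
      0 ≤ cur_pos.2 + m.2 * dis ∧ cur_pos.2 + m.2 * dis < ((board.headD []).length : Int)) then
    cur_pos
  else if (PySem.List.pyRange 1 (dis + 1) 1).any
      (fun k => pvCell board (cur_pos.1 + m.1 * k) (cur_pos.2 + m.2 * k) == "X") then
    cur_pos
  else (cur_pos.1 + m.1 * dis, cur_pos.2 + m.2 * dis)

-- ===== PRECONDITION & SPEC =====
-- Pre_ excludes inputs where int(distance) raises ValueError and, when the walk actually runs
-- (dis > 0), ragged boards and starts outside the board, on which A may raise IndexError; on a
-- minority of such inputs A happens to return before any bad access (see cites) — the third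
-- disjunct keeps the common safe part of them (the very first step already leaves the board on
-- the moving side, so both programs return cur_pos untouched).
def Pre_move_dog (board : List (List String)) (cur_pos : Int × Int) (direction : String) (distance : String) : Prop :=
  (PySem.Int.ofStr? distance).isSome ∧
  ((PySem.Int.ofStr? distance).getD 0 ≤ 0 ∨
    ((∀ r ∈ board, r.length = (board.headD []).length) ∧
      0 ≤ cur_pos.1 ∧ cur_pos.1 < (board.length : Int) ∧
      0 ≤ cur_pos.2 ∧ cur_pos.2 < ((board.headD []).length : Int)) ∨
    (if direction = "N" then
        cur_pos.2 < 0 ∨ cur_pos.1 ≤ 0 ∨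
          (cur_pos.2 = ((board.headD []).length : Int) ∧ board ≠ [])
      else if direction = "S" then
        cur_pos.2 < 0 ∨ cur_pos.1 + 1 = (board.length : Int) ∨
          (cur_pos.2 = ((board.headD []).length : Int) ∧ board ≠ [])
      else if direction = "W" then
        cur_pos.1 < 0 ∨ cur_pos.2 ≤ 0 ∨ cur_pos.1 = (board.length : Int)
      else
        cur_pos.1 < 0 ∨ cur_pos.1 = (board.length : Int) ∨
          (cur_pos.2 + 1 = ((board.headD []).length : Int) ∧ board ≠ [])))

instance (board : List (List String)) (cur_pos : Int × Int) (direction : String) (distance : String) : Decidable (Pre_move_dog board cur_pos direction distance) := by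
  unfold Pre_move_dog; infer_instance

def pvWitness_move_dog : List (List String) × (Int × Int) × String × String :=
  ([["."], ["X"]], (0, 0), "S", "1")

def Spec_move_dog (board : List (List String)) (cur_pos : Int × Int) (direction : String) (distance : String) (out : Int × Int) : Prop := out = move_dog_alt board cur_pos direction distance
instance (board : List (List String)) (cur_pos : Int × Int) (direction : String) (distance : String) (out : Int × Int) : Decidable (Spec_move_dog board cur_pos direction distance out) := by unfold Spec_move_dog; infer_instance

-- ===== CLAIM (what is proved, stated in full; the proofs are below) =====
def Claim_equal_move_dog : Prop := ∀ (board : List (List String)) (cur_pos : Int × Int) (direction : String) (distance : String), Dom_move_dog board cur_pos direction distance → Pre_move_dog board cur_pos direction distance → Spec_move_dog board cur_pos direction distance (move_dog board cur_pos direction distance)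

-- ===== LEMMAS AND PROOFS =====

-- B's literal dict lookup agrees with A's if-chain on every direction string
theorem pvDir_eq (direction : String) :
    (PySem.Dict.ofList [("N", ((-1 : Int), (0 : Int))), ("S", (1, 0)), ("W", (0, -1))]).getD
        direction (0, 1) =
      if direction = "N" then ((-1 : Int), (0 : Int))
      else if direction = "S" then (1, 0)
      else if direction = "W" then (0, -1)
      else (0, 1) := by
  have h : PySem.Dict.ofList [("N", ((-1 : Int), (0 : Int))), ("S", (1, 0)), ("W", (0, -1))]
      = PySem.Dict.mk [("N", ((-1 : Int), (0 : Int))), ("S", (1, 0)), ("W", (0, -1))] := by decide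
  rw [h]
  rcases eq_or_ne direction "N" with h1 | h1
  · subst h1; decide
  rcases eq_or_ne direction "S" with h2 | h2
  · subst h2; decide
  rcases eq_or_ne direction "W" with h3 | h3
  · subst h3; decide
  simp [PySem.Dict.getD, h1, h2, h3, PySem.Dict.get?,
    (Ne.symm h1), (Ne.symm h2), (Ne.symm h3)]

-- A's walk, started in bounds, equals B's endpoint-check-then-wall-scan shape
theorem pvWalkA_eq (board : List (List String)) (cur : Int × Int) (mi mj : Int)
    (hd : (mi, mj) = ((-1 : Int), (0 : Int)) ∨ (mi, mj) = (1, 0) ∨ (mi, mj) = (0, -1) ∨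
      (mi, mj) = (0, 1)) :
    ∀ (n : Nat) (ci cj : Int), 0 ≤ ci → ci < (board.length : Int) →
      0 ≤ cj → cj < ((board.headD []).length : Int) →
      pvWalkA board cur mi mj ci cj n =
        if 0 ≤ ci + mi * n ∧ ci + mi * n < (board.length : Int) ∧
            0 ≤ cj + mj * n ∧ cj + mj * n < ((board.headD []).length : Int) then
          (if (List.range n).any
              (fun k => pvCell board (ci + mi * (k + 1)) (cj + mj * (k + 1)) == "X") then cur
           else (ci + mi * n, cj + mj * n))
        else cur := by
  intro n
  induction n with
  | zero =>
    intro ci cj h1 h2 h3 h4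
    simp only [pvWalkA, Nat.cast_zero, mul_zero, add_zero, List.range_zero, List.any_nil]
    rw [if_pos ⟨h1, h2, h3, h4⟩]
    simp
  | succ n ih =>
    intro ci cj h1 h2 h3 h4
    rw [pvWalkA]
    by_cases hg : 0 > ci + mi ∨ 0 > cj + mj ∨ (board.length : Int) = ci + mi ∨
        ((board.headD []).length : Int) = cj + mj
    · rw [if_pos hg]
      have hout : ¬ (0 ≤ ci + mi * (n+1 : Nat) ∧ ci + mi * (n+1 : Nat) < (board.length : Int) ∧
          0 ≤ cj + mj * (n+1 : Nat) ∧ cj + mj * (n+1 : Nat) < ((board.headD []).length : Int)) := by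
        rcases hd with h|h|h|h <;>
          (injection h with e1 e2; subst e1; subst e2; push_cast; push_cast at hg; omega)
      rw [if_neg hout]
    · rw [if_neg hg]
      push_neg at hg
      obtain ⟨g1, g2, g3, g4⟩ := hg
      have b1 : 0 ≤ ci + mi := g1
      have b2 : ci + mi < (board.length : Int) := by
        rcases hd with h|h|h|h <;> (injection h with e1 e2; subst e1; subst e2; omega)
      have b3 : 0 ≤ cj + mj := g2
      have b4 : cj + mj < ((board.headD []).length : Int) := by
        rcases hd with h|h|h|h <;> (injection h with e1 e2; subst e1; subst e2; omega)
      have hend1 : ci + mi + mi * (n : Nat) = ci + mi * ((n : Nat) + 1) := by push_cast; ring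
      have hend2 : cj + mj + mj * (n : Nat) = cj + mj * ((n : Nat) + 1) := by push_cast; ring
      have hany :
          ((List.range (n+1)).any
            (fun k => pvCell board (ci + mi * (k + 1)) (cj + mj * (k + 1)) == "X"))
          = ((pvCell board (ci + mi) (cj + mj) == "X") ||
             (List.range n).any
               (fun k => pvCell board (ci + mi + mi * (k + 1)) (cj + mj + mj * (k + 1)) == "X")) := by
        rw [List.range_succ_eq_map, List.any_cons, List.any_map]
        have hfun : ((fun k : Nat => pvCell board (ci + mi * (k + 1)) (cj + mj * (k + 1)) == "X") ∘ Nat.succ)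
            = (fun k : Nat => pvCell board (ci + mi + mi * (k + 1)) (cj + mj + mj * (k + 1)) == "X") := by
          funext k
          simp only [Function.comp]
          congr 2 <;> push_cast <;> ring
        rw [hfun]
        congr 2 <;> norm_num
      by_cases hx : pvCell board (ci + mi) (cj + mj) = "X"
      · rw [if_pos hx]
        by_cases hin : 0 ≤ ci + mi * ((n+1 : Nat) : Int) ∧ ci + mi * ((n+1 : Nat) : Int) < (board.length : Int) ∧
            0 ≤ cj + mj * ((n+1 : Nat) : Int) ∧ cj + mj * ((n+1 : Nat) : Int) < ((board.headD []).length : Int)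
        · rw [if_pos hin, if_pos]
          rw [hany]
          simp [hx]
        · rw [if_neg hin]
      · rw [if_neg hx, ih (ci + mi) (cj + mj) b1 b2 b3 b4]
        rw [hend1, hend2, hany]
        have hxf : (pvCell board (ci + mi) (cj + mj) == "X") = false := by
          simp [hx]
        rw [hxf, Bool.false_or]
        push_cast
        rfl

-- B's wall scan over range(1, dis+1) equals the range(dis)-indexed scan of the walk lemma
theorem pvAny_eq (board : List (List String)) (a b mi mj dis : Int) :
    (PySem.List.pyRange 1 (dis + 1) 1).any
        (fun k => pvCell board (a + mi * k) (b + mj * k) == "X")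
      = (List.range dis.toNat).any
        (fun k => pvCell board (a + mi * ((k : Int) + 1)) (b + mj * ((k : Int) + 1)) == "X") := by
  have h1 : dis + 1 - 1 = dis := by ring
  rw [PySem.List.pyRange_one, h1]
  rw [List.any_map (f := fun k : Nat => (1 : Int) + (k : Int))]
  congr 1
  funext k
  simp only [Function.comp]
  congr 3 <;> ring

-- ===== VERDICT (by name: the statement is the Claim_ definition above) =====
theorem move_dog_spec : Claim_equal_move_dog := by
  intro board cur direction distance _hdom hpre
  unfold Spec_move_dog
  simp only [move_dog, move_dog_alt]
  rw [pvDir_eq]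
  obtain ⟨hsome, hcase⟩ := hpre
  set dis := (PySem.Int.ofStr? distance).getD 0 with hdis
  set m := (if direction = "N" then ((-1 : Int), (0 : Int))
    else if direction = "S" then ((1 : Int), (0 : Int))
    else if direction = "W" then ((0 : Int), (-1 : Int))
    else ((0 : Int), (1 : Int))) with hm
  by_cases hd0 : dis ≤ 0
  · have ht : dis.toNat = 0 := Int.toNat_of_nonpos hd0
    have hmax : max dis 0 = 0 := max_eq_right hd0
    rw [ht, hmax]
    simp [pvWalkA]
  · have hdpos : 0 < dis := by omega
    have hmax : max dis 0 = dis := max_eq_left (le_of_lt hdpos)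
    rw [hmax]
    rcases hcase with h | hmain | hexit
    · omega
    · obtain ⟨_hrect, h1, h2, h3, h4⟩ := hmain
      have hd : m = ((-1 : Int), (0 : Int)) ∨ m = (1, 0) ∨ m = (0, -1) ∨ m = (0, 1) := by
        rw [hm]; split_ifs <;> simp
      have hd2 : (m.1, m.2) = ((-1 : Int), (0 : Int)) ∨ (m.1, m.2) = (1, 0) ∨
          (m.1, m.2) = (0, -1) ∨ (m.1, m.2) = (0, 1) := by
        rw [Prod.mk.eta]; exact hd
      rw [pvWalkA_eq board cur m.1 m.2 hd2 dis.toNat cur.1 cur.2 h1 h2 h3 h4]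
      have hcast : ((dis.toNat : Int)) = dis := Int.toNat_of_nonneg (le_of_lt hdpos)
      rw [hcast]
      rw [pvAny_eq board cur.1 cur.2 m.1 m.2 dis]
      by_cases hin : 0 ≤ cur.1 + m.1 * dis ∧ cur.1 + m.1 * dis < (board.length : Int) ∧
          0 ≤ cur.2 + m.2 * dis ∧ cur.2 + m.2 * dis < ((board.headD []).length : Int)
      · rw [if_pos hin, if_neg (show ¬(dis ≠ 0 ∧ ¬(0 ≤ cur.1 + m.1 * dis ∧
          cur.1 + m.1 * dis < (board.length : Int) ∧ 0 ≤ cur.2 + m.2 * dis ∧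
          cur.2 + m.2 * dis < ((board.headD []).length : Int)))
          from fun h => h.2 hin)]
      · rw [if_neg hin, if_pos ⟨by omega, hin⟩]
    · obtain ⟨n, hn⟩ : ∃ n, dis.toNat = n + 1 := ⟨dis.toNat - 1, by omega⟩
      rw [hn, pvWalkA]
      by_cases hN : direction = "N"
      · rw [if_pos hN] at hexit
        have hm' : m = ((-1 : Int), (0 : Int)) := by rw [hm, if_pos hN]
        rw [hm']
        have hx : cur.2 < 0 ∨ cur.1 ≤ 0 ∨ cur.2 = ((board.headD []).length : Int) :=
          hexit.imp id (Or.imp id And.left)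
        clear hexit
        rw [if_pos (show 0 > cur.1 + (-1 : Int) ∨ 0 > cur.2 + (0 : Int) ∨
            (board.length : Int) = cur.1 + (-1) ∨
            ((board.headD []).length : Int) = cur.2 + 0 by omega)]
        rw [if_pos (show dis ≠ 0 ∧ ¬(0 ≤ cur.1 + (-1 : Int) * dis ∧
            cur.1 + (-1 : Int) * dis < (board.length : Int) ∧ 0 ≤ cur.2 + (0 : Int) * dis ∧
            cur.2 + (0 : Int) * dis < ((board.headD []).length : Int))
          from ⟨by omega, by omega⟩)]
      · rw [if_neg hN] at hexit
        by_cases hS : direction = "S"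
        · rw [if_pos hS] at hexit
          have hm' : m = ((1 : Int), (0 : Int)) := by rw [hm, if_neg hN, if_pos hS]
          rw [hm']
          have hx : cur.2 < 0 ∨ cur.1 + 1 = (board.length : Int) ∨
              cur.2 = ((board.headD []).length : Int) :=
            hexit.imp id (Or.imp id And.left)
          clear hexit
          rw [if_pos (show 0 > cur.1 + (1 : Int) ∨ 0 > cur.2 + (0 : Int) ∨
              (board.length : Int) = cur.1 + 1 ∨
              ((board.headD []).length : Int) = cur.2 + 0 by omega)]
          rw [if_pos (show dis ≠ 0 ∧ ¬(0 ≤ cur.1 + (1 : Int) * dis ∧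
              cur.1 + (1 : Int) * dis < (board.length : Int) ∧ 0 ≤ cur.2 + (0 : Int) * dis ∧
              cur.2 + (0 : Int) * dis < ((board.headD []).length : Int))
            from ⟨by omega, by omega⟩)]
        · rw [if_neg hS] at hexit
          by_cases hW : direction = "W"
          · rw [if_pos hW] at hexit
            have hm' : m = ((0 : Int), (-1 : Int)) := by rw [hm, if_neg hN, if_neg hS, if_pos hW]
            rw [hm']
            rw [if_pos (show 0 > cur.1 + (0 : Int) ∨ 0 > cur.2 + (-1 : Int) ∨
                (board.length : Int) = cur.1 + 0 ∨
                ((board.headD []).length : Int) = cur.2 + (-1) by omega)]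
            rw [if_pos (show dis ≠ 0 ∧ ¬(0 ≤ cur.1 + (0 : Int) * dis ∧
                cur.1 + (0 : Int) * dis < (board.length : Int) ∧ 0 ≤ cur.2 + (-1 : Int) * dis ∧
                cur.2 + (-1 : Int) * dis < ((board.headD []).length : Int))
              from ⟨by omega, by omega⟩)]
          · rw [if_neg hW] at hexit
            have hm' : m = ((0 : Int), (1 : Int)) := by rw [hm, if_neg hN, if_neg hS, if_neg hW]
            rw [hm']
            have hx : cur.1 < 0 ∨ cur.1 = (board.length : Int) ∨
                cur.2 + 1 = ((board.headD []).length : Int) :=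
              hexit.imp id (Or.imp id And.left)
            clear hexit
            rw [if_pos (show 0 > cur.1 + (0 : Int) ∨ 0 > cur.2 + (1 : Int) ∨
                (board.length : Int) = cur.1 + 0 ∨
                ((board.headD []).length : Int) = cur.2 + 1 by omega)]
            rw [if_pos (show dis ≠ 0 ∧ ¬(0 ≤ cur.1 + (0 : Int) * dis ∧
                cur.1 + (0 : Int) * dis < (board.length : Int) ∧ 0 ≤ cur.2 + (1 : Int) * dis ∧
                cur.2 + (1 : Int) * dis < ((board.headD []).length : Int))
              from ⟨by omega, by omega⟩)]
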